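-- pv_equiv track=rewrite | github.com/tqkhai260595/HW4 | HW4 PYTHON CODE/cacti.py | cacti_number
-- ===== SOURCE A (Python) =====
-- def cacti_number(plot):
--     # Initialize a variable to keep track of the count
--     count = 0
--
--     # Iterate through the rows and columns of the plot
--     for i in range(len(plot)):
--         for j in range(len(plot[i])):
--             # Check if the current plot is empty (0)
--             if plot[i][j] == 0:
--                 # Check if there are no adjacent cacti (horizontally or vertically)
--                 if (
--                     (i == 0 or plot[i - 1][j] == 0) and  # Check above
--                     (i == len(plot) - 1 or plot[i + 1][j] == 0) and  # Check below
--                     (j == 0 or plot[i][j - 1] == 0) and  # Check left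
--                     (j == len(plot[i]) - 1 or plot[i][j + 1] == 0)  # Check right
--                 ):
--                     # Increment the count if conditions are met
--                     count += 1
--
--     return count
-- ===== SOURCE B (Python) =====
-- def cacti_number(plot):
--     # Pass 1: mark every coordinate orthogonally adjacent to a cactus.
--     blocked = set()
--     for i, row in enumerate(plot):
--         for j, v in enumerate(row):
--             if v != 0:
--                 blocked.update(((i - 1, j), (i + 1, j), (i, j - 1), (i, j + 1)))
--     # Pass 2: count empty cells that were never marked.
--     count = 0
--     for i, row in enumerate(plot):
--         for j, v in enumerate(row):
--             if v == 0 and (i, j) not in blocked: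
--                 count += 1
--     return count
-- ===== Notes on version B (the rewrite author's own statement) =====
-- stated objective: alternative
-- what changed: B replaces A's per-empty-cell four-way boundary-guarded neighbor probing with a two-pass marking algorithm: first build a set of all coordinates orthogonally adjacent to some cactus, then count empty cells not in that set.
import Mathlib
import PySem

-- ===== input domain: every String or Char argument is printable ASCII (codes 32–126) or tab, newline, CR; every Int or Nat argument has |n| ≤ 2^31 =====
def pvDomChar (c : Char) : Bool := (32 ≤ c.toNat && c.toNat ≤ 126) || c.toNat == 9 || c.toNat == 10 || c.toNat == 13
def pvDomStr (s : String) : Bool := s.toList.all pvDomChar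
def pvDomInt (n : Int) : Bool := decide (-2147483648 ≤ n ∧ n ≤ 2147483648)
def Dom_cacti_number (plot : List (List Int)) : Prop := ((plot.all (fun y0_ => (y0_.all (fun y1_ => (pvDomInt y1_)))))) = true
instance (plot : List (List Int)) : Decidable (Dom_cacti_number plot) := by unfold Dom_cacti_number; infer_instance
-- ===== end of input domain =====

-- B replaces A's per-empty-cell guarded neighbor probing with a two-pass algorithm: mark all
-- coordinates adjacent to a cactus in a set, then count unmarked empty cells (alternative, same cost).


-- ===== PORT A =====
-- Literal port of A's nested index loops. Neighbor reads that Python would raise IndexError on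
-- (a vertical neighbor in a shorter row of a ragged grid) are rendered with getD default 0;
-- Pre_cacti_number excludes exactly those inputs, so on Pre_ every getD is the actual Python read.
def cacti_number (plot : List (List Int)) : Int :=
  (List.range plot.length).foldl (fun count i =>
    (List.range (plot.getD i []).length).foldl (fun count j =>
      if (plot.getD i []).getD j 0 = 0 ∧
         (i = 0 ∨ (plot.getD (i - 1) []).getD j 0 = 0) ∧
         (i = plot.length - 1 ∨ (plot.getD (i + 1) []).getD j 0 = 0) ∧
         (j = 0 ∨ (plot.getD i []).getD (j - 1) 0 = 0) ∧
         (j = (plot.getD i []).length - 1 ∨ (plot.getD i []).getD (j + 1) 0 = 0)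
      then count + 1 else count) count) 0

-- ===== PORT B =====
-- Pass 1 of Source B: the set of coordinates orthogonally adjacent to some cactus.
def cactiBlocked (plot : List (List Int)) : PySem.Set (Int × Int) :=
  (PySem.List.enumerate plot 0).foldl (fun s pr =>
    (PySem.List.enumerate pr.2 0).foldl (fun s pc =>
      if pc.2 ≠ 0 then
        PySem.Set.update s [(pr.1 - 1, pc.1), (pr.1 + 1, pc.1), (pr.1, pc.1 - 1), (pr.1, pc.1 + 1)]
      else s) s) PySem.Set.empty

def cacti_number_alt (plot : List (List Int)) : Int :=
  (PySem.List.enumerate plot 0).foldl (fun count pr =>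
    (PySem.List.enumerate pr.2 0).foldl (fun count pc =>
      if pc.2 = 0 ∧ (pr.1, pc.1) ∉ cactiBlocked plot then count + 1 else count) count) 0

-- ===== PRECONDITION & SPEC =====
-- Pre_ excludes exactly the inputs where Python A raises IndexError: an empty cell whose read of a
-- vertically adjacent (ragged, shorter) row is out of range, following A's short-circuit order.
def Pre_cacti_number (plot : List (List Int)) : Prop :=
  ∀ i ∈ List.range plot.length, ∀ j ∈ List.range (plot.getD i []).length,
    (plot.getD i []).getD j 0 = 0 →
    (0 < i → j < (plot.getD (i - 1) []).length) ∧
    ((i = 0 ∨ (plot.getD (i - 1) []).getD j 0 = 0) → i + 1 < plot.length →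
      j < (plot.getD (i + 1) []).length)
instance (plot : List (List Int)) : Decidable (Pre_cacti_number plot) := by
  unfold Pre_cacti_number; infer_instance
def pvWitness_cacti_number : List (List Int) := [[0, 1], [0, 0]]

def Spec_cacti_number (plot : List (List Int)) (out : Int) : Prop := out = cacti_number_alt plot
instance (plot : List (List Int)) (out : Int) : Decidable (Spec_cacti_number plot out) := by
  unfold Spec_cacti_number; infer_instance

-- ===== CLAIM (what is proved, stated in full; the proofs are below) =====
def Claim_equal_cacti_number : Prop := ∀ (plot : List (List Int)), Dom_cacti_number plot → Pre_cacti_number plot → Spec_cacti_number plot (cacti_number plot)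

-- ===== LEMMAS AND PROOFS =====

-- total cell read: 0 outside the grid
def gcell (plot : List (List Int)) (a b : Nat) : Int := (plot.getD a []).getD b 0

lemma mem_foldl_set {α β : Type} [BEq β] [LawfulBEq β]
    (l : List α) (f : PySem.Set β → α → PySem.Set β) (P : α → β → Prop)
    (hf : ∀ s x y, y ∈ f s x ↔ y ∈ s ∨ P x y) :
    ∀ (s : PySem.Set β) (y : β), y ∈ l.foldl f s ↔ y ∈ s ∨ ∃ x ∈ l, P x y := by
  induction l with
  | nil => simp
  | cons a t ih =>
    intro s y
    rw [List.foldl_cons, ih, hf]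
    simp only [List.mem_cons]
    constructor
    · rintro ((h | h) | ⟨x, hx, hP⟩)
      · exact Or.inl h
      · exact Or.inr ⟨a, Or.inl rfl, h⟩
      · exact Or.inr ⟨x, Or.inr hx, hP⟩
    · rintro (h | ⟨x, (rfl | hx), hP⟩)
      · exact Or.inl (Or.inl h)
      · exact Or.inl (Or.inr hP)
      · exact Or.inr ⟨x, hx, hP⟩

lemma mem_blocked (plot : List (List Int)) (y : Int × Int) :
    y ∈ cactiBlocked plot ↔ ∃ pr ∈ PySem.List.enumerate plot 0, ∃ pc ∈ PySem.List.enumerate pr.2 0,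
      pc.2 ≠ 0 ∧ (y = (pr.1 - 1, pc.1) ∨ y = (pr.1 + 1, pc.1) ∨
                  y = (pr.1, pc.1 - 1) ∨ y = (pr.1, pc.1 + 1)) := by
  unfold cactiBlocked
  rw [mem_foldl_set _ _
    (fun pr y => ∃ pc ∈ PySem.List.enumerate pr.2 0, pc.2 ≠ 0 ∧
      (y = (pr.1 - 1, pc.1) ∨ y = (pr.1 + 1, pc.1) ∨ y = (pr.1, pc.1 - 1) ∨ y = (pr.1, pc.1 + 1)))
    ?_]
  · simp [PySem.Set.empty]
  · intro s x y
    rw [mem_foldl_set _ _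
      (fun pc y => pc.2 ≠ 0 ∧
        (y = (x.1 - 1, pc.1) ∨ y = (x.1 + 1, pc.1) ∨ y = (x.1, pc.1 - 1) ∨ y = (x.1, pc.1 + 1)))
      ?_]
    intro s' pc y'
    split_ifs with h
    · simp only [PySem.Set.mem_update, List.mem_cons, List.not_mem_nil, or_false]
      tauto
    · simp only [not_not] at h
      simp [h]

lemma gcell_ne_zero {plot : List (List Int)} {a b : Nat} (h : gcell plot a b ≠ 0) :
    ∃ (ha : a < plot.length) (hb : b < plot[a].length), plot[a][b] = gcell plot a b := by
  unfold gcell at *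
  by_cases ha : a < plot.length
  · rw [List.getD_eq_getElem plot [] ha] at *
    by_cases hb : b < plot[a].length
    · exact ⟨ha, hb, (List.getD_eq_getElem _ 0 hb).symm⟩
    · exact absurd (List.getD_eq_default _ 0 (Nat.le_of_not_lt hb)) h
  · rw [List.getD_eq_default plot [] (Nat.le_of_not_lt ha)] at h
    simp at h

lemma gcell_of_lt {plot : List (List Int)} {a b : Nat}
    (ha : a < plot.length) (hb : b < plot[a].length) : gcell plot a b = plot[a][b] := by
  unfold gcell
  rw [List.getD_eq_getElem plot [] ha, List.getD_eq_getElem _ 0 hb]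

lemma blocked_iff (plot : List (List Int)) (i j : Nat) :
    ((i : Int), (j : Int)) ∈ cactiBlocked plot ↔
      gcell plot (i + 1) j ≠ 0 ∨ (0 < i ∧ gcell plot (i - 1) j ≠ 0) ∨
      gcell plot i (j + 1) ≠ 0 ∨ (0 < j ∧ gcell plot i (j - 1) ≠ 0) := by
  rw [mem_blocked]
  constructor
  · rintro ⟨pr, hpr, pc, hpc, hne, hc⟩
    rw [PySem.List.mem_enumerate_iff] at hpr
    obtain ⟨k, hk, rfl⟩ := hpr
    rw [PySem.List.mem_enumerate_iff] at hpc
    obtain ⟨m, hm, rfl⟩ := hpc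
    simp only [zero_add] at hne hc
    rcases hc with h | h | h | h <;> simp only [Prod.mk.injEq] at h <;> obtain ⟨h1, h2⟩ := h
    · have hk' : k = i + 1 := by omega
      have hm' : m = j := by omega
      subst hk'; subst hm'
      exact Or.inl (by rw [gcell_of_lt hk hm]; exact hne)
    · have hi : 0 < i := by omega
      have hk' : k = i - 1 := by omega
      have hm' : m = j := by omega
      subst hk'; subst hm'
      exact Or.inr (Or.inl ⟨hi, by rw [gcell_of_lt hk hm]; exact hne⟩)
    · have hk' : k = i := by omega
      have hm' : m = j + 1 := by omega
      subst hk'; subst hm'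
      exact Or.inr (Or.inr (Or.inl (by rw [gcell_of_lt hk hm]; exact hne)))
    · have hj : 0 < j := by omega
      have hk' : k = i := by omega
      have hm' : m = j - 1 := by omega
      subst hk'; subst hm'
      exact Or.inr (Or.inr (Or.inr ⟨hj, by rw [gcell_of_lt hk hm]; exact hne⟩))
  · rintro (h | ⟨hi, h⟩ | h | ⟨hj, h⟩)
    · obtain ⟨ha, hb, hv⟩ := gcell_ne_zero h
      refine ⟨(((i + 1 : Nat) : Int), plot[i + 1]), ?_, (((j : Nat) : Int), plot[i + 1][j]), ?_, ?_, ?_⟩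
      · rw [PySem.List.mem_enumerate_iff]; exact ⟨i + 1, ha, by simp⟩
      · rw [PySem.List.mem_enumerate_iff]; exact ⟨j, hb, by simp⟩
      · rw [hv]; exact h
      · left
        have h1 : ((i : Int)) = (((i + 1 : Nat) : Int) - 1) := by omega
        rw [h1]
    · obtain ⟨ha, hb, hv⟩ := gcell_ne_zero h
      refine ⟨(((i - 1 : Nat) : Int), plot[i - 1]), ?_, (((j : Nat) : Int), plot[i - 1][j]), ?_, ?_, ?_⟩
      · rw [PySem.List.mem_enumerate_iff]; exact ⟨i - 1, ha, by simp⟩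
      · rw [PySem.List.mem_enumerate_iff]; exact ⟨j, hb, by simp⟩
      · rw [hv]; exact h
      · right; left
        have h1 : ((i : Int)) = (((i - 1 : Nat) : Int) + 1) := by omega
        rw [h1]
    · obtain ⟨ha, hb, hv⟩ := gcell_ne_zero h
      refine ⟨(((i : Nat) : Int), plot[i]), ?_, (((j + 1 : Nat) : Int), plot[i][j + 1]), ?_, ?_, ?_⟩
      · rw [PySem.List.mem_enumerate_iff]; exact ⟨i, ha, by simp⟩
      · rw [PySem.List.mem_enumerate_iff]; exact ⟨j + 1, hb, by simp⟩
      · rw [hv]; exact h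
      · right; right; left
        have h1 : ((j : Int)) = (((j + 1 : Nat) : Int) - 1) := by omega
        rw [h1]
    · obtain ⟨ha, hb, hv⟩ := gcell_ne_zero h
      refine ⟨(((i : Nat) : Int), plot[i]), ?_, (((j - 1 : Nat) : Int), plot[i][j - 1]), ?_, ?_, ?_⟩
      · rw [PySem.List.mem_enumerate_iff]; exact ⟨i, ha, by simp⟩
      · rw [PySem.List.mem_enumerate_iff]; exact ⟨j - 1, hb, by simp⟩
      · rw [hv]; exact h
      · right; right; right
        have h1 : ((j : Int)) = (((j - 1 : Nat) : Int) + 1) := by omega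
        rw [h1]

lemma enum_foldl_eq {α β : Type} (xs : List α) (d : α) (f : β → Int × α → β) :
    ∀ (s : Int) (b : β), (PySem.List.enumerate xs s).foldl f b =
      (List.range xs.length).foldl (fun acc (k : Nat) => f acc (s + (k : Int), xs.getD k d)) b := by
  induction xs with
  | nil => intro s b; simp [PySem.List.enumerate_nil]
  | cons x t ih =>
    intro s b
    rw [PySem.List.enumerate_cons, List.foldl_cons, ih (s + 1)]
    rw [List.length_cons, List.range_succ_eq_map, List.foldl_cons, List.foldl_map]
    simp only [Nat.cast_zero, add_zero, List.getD_cons_zero, Nat.succ_eq_add_one]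
    apply PySem.List.foldl_congr_mem
    intro acc k _
    have h1 : s + 1 + (k : Int) = s + ((k : Int) + 1) := by ring
    simp only [List.getD_cons_succ, Nat.cast_add, Nat.cast_one, h1]

lemma cell_cond_iff (plot : List (List Int)) (i j : Nat)
    (_hi : i < plot.length) (_hj : j < (plot.getD i []).length) :
    ((plot.getD i []).getD j 0 = 0 ∧
     (i = 0 ∨ (plot.getD (i - 1) []).getD j 0 = 0) ∧
     (i = plot.length - 1 ∨ (plot.getD (i + 1) []).getD j 0 = 0) ∧
     (j = 0 ∨ (plot.getD i []).getD (j - 1) 0 = 0) ∧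
     (j = (plot.getD i []).length - 1 ∨ (plot.getD i []).getD (j + 1) 0 = 0)) ↔
    ((plot.getD i []).getD j 0 = 0 ∧ ((i : Int), (j : Int)) ∉ cactiBlocked plot) := by
  have hI0 : i = plot.length - 1 → (plot.getD (i + 1) []).getD j 0 = 0 := fun h => by
    rw [List.getD_eq_default plot [] (by omega)]; simp
  have hJ0 : j = (plot.getD i []).length - 1 → (plot.getD i []).getD (j + 1) 0 = 0 := fun h => by
    rw [List.getD_eq_default _ 0 (by omega)]
  have hm := blocked_iff plot i j
  unfold gcell at hm
  rw [hm]
  constructor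
  · rintro ⟨h1, h2, h3, h4, h5⟩
    refine ⟨h1, ?_⟩
    rintro (hx | ⟨hi0, hx⟩ | hx | ⟨hj0, hx⟩)
    · rcases h3 with h | h
      · exact hx (hI0 h)
      · exact hx h
    · rcases h2 with h | h
      · omega
      · exact hx h
    · rcases h5 with h | h
      · exact hx (hJ0 h)
      · exact hx h
    · rcases h4 with h | h
      · omega
      · exact hx h
  · rintro ⟨h1, h2⟩
    simp only [not_or, not_and, not_not] at h2
    obtain ⟨n1, n2, n3, n4⟩ := h2
    refine ⟨h1, ?_, Or.inr n1, ?_, Or.inr n3⟩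
    · by_cases h : i = 0
      · exact Or.inl h
      · exact Or.inr (n2 (by omega))
    · by_cases h : j = 0
      · exact Or.inl h
      · exact Or.inr (n4 (by omega))

lemma ports_agree (plot : List (List Int)) : cacti_number plot = cacti_number_alt plot := by
  unfold cacti_number cacti_number_alt
  rw [enum_foldl_eq plot [] _ 0 0]
  apply PySem.List.foldl_congr_mem
  intro acc i hi
  simp only [zero_add]
  rw [enum_foldl_eq (plot.getD i []) 0 _ 0 acc]
  apply PySem.List.foldl_congr_mem
  intro acc2 j hj
  simp only [zero_add]
  exact if_congr (cell_cond_iff plot i j (List.mem_range.mp hi) (List.mem_range.mp hj)) rfl rfl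

-- ===== VERDICT (by name: the statement is the Claim_ definition above) =====
theorem cacti_number_spec : Claim_equal_cacti_number := by
  intro plot _ _
  unfold Spec_cacti_number
  exact ports_agree plot
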